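-- pv_equiv track=rewrite | github.com/JeanBergues/AOC2023 | day13/main.py | find_potential_reflection_axes
-- ===== SOURCE A (Python) =====
-- def find_potential_reflection_axes(p):
--     # Check for horizontal reflections
--     potential_axes = list(range(1, len(p[0])))
--
--     for row in p:
--         new_axes = []
--         for ax in potential_axes:
--             l, r = row[0:ax], row[ax:]
--             length = min(len(l), len(r))
--             cl, cr = l[(len(l) - length):], r[0:length]
--             if cl == cr[::-1]:
--                 new_axes.append(ax)
--         potential_axes = new_axes
--
--     return potential_axes
-- ===== SOURCE B (Python) =====
-- def find_potential_reflection_axes(p):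
--     # Axis-major: for each candidate axis expand outward from the axis,
--     # comparing mirrored characters in place (no slice/reverse allocations).
--     def axis_ok(row, ax):
--         k = 0
--         n = len(row)
--         while ax - 1 - k >= 0 and ax + k < n:
--             if row[ax - 1 - k] != row[ax + k]:
--                 return False
--             k += 1
--         return True
--     return [ax for ax in range(1, len(p[0])) if all(axis_ok(row, ax) for row in p)]
-- ===== Notes on version B (the rewrite author's own statement) =====
-- stated objective: alternative
-- what changed: Row-major filtering that allocates slices and a reversed copy per axis is replaced by an axis-major scan that expands outward from each axis comparing mirrored characters in place, with all() short-circuiting over rows.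
import Mathlib
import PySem

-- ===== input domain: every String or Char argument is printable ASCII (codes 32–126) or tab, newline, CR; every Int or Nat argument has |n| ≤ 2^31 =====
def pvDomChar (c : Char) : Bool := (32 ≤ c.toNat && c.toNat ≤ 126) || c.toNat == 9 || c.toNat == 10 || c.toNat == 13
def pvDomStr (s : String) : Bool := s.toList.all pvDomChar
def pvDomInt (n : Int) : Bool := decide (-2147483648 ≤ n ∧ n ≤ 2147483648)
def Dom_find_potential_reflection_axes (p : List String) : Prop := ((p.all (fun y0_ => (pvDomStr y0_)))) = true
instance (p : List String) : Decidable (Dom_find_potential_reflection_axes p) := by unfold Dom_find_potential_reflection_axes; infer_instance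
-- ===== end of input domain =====

-- B replaces A's row-major filtering with slice/reverse comparisons by an axis-major
-- outward expansion comparing mirrored characters in place (objective: alternative).

-- ===== PORT A =====
-- per-row reflection test of A: l, r = row[0:ax], row[ax:]; length = min(len l, len r);
-- cl, cr = l[len(l)-length:], r[0:length]; cl == cr[::-1]
def pvRowTestA (row : List Char) (ax : Int) : Bool :=
  let l := PySem.List.slice row (some 0) (some ax)
  let r := PySem.List.slice row (some ax) none
  let length : Nat := min l.length r.length
  let cl := PySem.List.slice l (some ((l.length : Int) - (length : Int))) none
  let cr := PySem.List.slice r (some 0) (some (length : Int))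
  cl == ((PySem.List.slice? cr none none (-1)).getD [])

def find_potential_reflection_axes (p : List String) : List Int :=
  let potential_axes := PySem.List.pyRange 1 (((p[0]?.getD "").toList.length : Int))
  p.foldl (fun potential_axes row =>
      potential_axes.foldl (fun new_axes ax =>
          if pvRowTestA row.toList ax then new_axes ++ [ax] else new_axes) [])
    potential_axes

-- ===== PORT B =====
-- B's while loop: expand k outward from the axis while both mirrored indices are in range
def pvAxisOkGo (row : List Char) (ax : Int) (k : Nat) : Bool :=
  if h : 0 ≤ ax - 1 - (k : Int) ∧ ax + (k : Int) < (row.length : Int) then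
    if PySem.List.pyGet? row (ax - 1 - (k : Int)) != PySem.List.pyGet? row (ax + (k : Int)) then
      false
    else
      pvAxisOkGo row ax (k + 1)
  else
    true
termination_by row.length - k
decreasing_by omega

def pvAxisOk (row : List Char) (ax : Int) : Bool := pvAxisOkGo row ax 0

def find_potential_reflection_axes_alt (p : List String) : List Int :=
  (PySem.List.pyRange 1 (((p[0]?.getD "").toList.length : Int))).filter
    (fun ax => p.all (fun row => pvAxisOk row.toList ax))

-- ===== PRECONDITION & SPEC =====
-- Pre_ excludes only the empty list, on which A raises IndexError at p[0].
def Pre_find_potential_reflection_axes (p : List String) : Prop := p ≠ []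
instance (p : List String) : Decidable (Pre_find_potential_reflection_axes p) := by
  unfold Pre_find_potential_reflection_axes; infer_instance

def pvWitness_find_potential_reflection_axes : List String := ["#..#", "#..#"]

def Spec_find_potential_reflection_axes (p : List String) (out : List Int) : Prop :=
  out = find_potential_reflection_axes_alt p
instance (p : List String) (out : List Int) : Decidable (Spec_find_potential_reflection_axes p out) := by
  unfold Spec_find_potential_reflection_axes; infer_instance

-- ===== CLAIM (what is proved, stated in full; the proofs are below) =====
def Claim_equal_find_potential_reflection_axes : Prop :=
  ∀ (p : List String), Dom_find_potential_reflection_axes p →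
    Pre_find_potential_reflection_axes p →
    Spec_find_potential_reflection_axes p (find_potential_reflection_axes p)

-- ===== LEMMAS AND PROOFS =====

-- the loop of B, characterised: it returns true iff every still-reachable mirrored pair matches
lemma pvAxisOkGo_iff (row : List Char) (ax : Int) (k : Nat) :
    pvAxisOkGo row ax k = true ↔
      ∀ j : Nat, k ≤ j → 0 ≤ ax - 1 - (j : Int) → ax + (j : Int) < (row.length : Int) →
        PySem.List.pyGet? row (ax - 1 - (j : Int)) = PySem.List.pyGet? row (ax + (j : Int)) := by
  fun_induction pvAxisOkGo row ax k with
  | case1 k hg hne =>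
      -- mismatch: loop returns false, and j = k witnesses the failure
      rw [iff_false_intro (by simp : ¬ (false = true)), false_iff]
      intro hall
      exact (by simpa using hne : PySem.List.pyGet? row (ax - 1 - (k : Int)) ≠ PySem.List.pyGet? row (ax + (k : Int)))
        (hall k le_rfl hg.1 hg.2)
  | case2 k hg hne ih =>
      -- matched characters, continue with k+1
      rw [ih]
      have hk : PySem.List.pyGet? row (ax - 1 - (k : Int)) = PySem.List.pyGet? row (ax + (k : Int)) := by
        simpa using hne
      constructor
      · intro hall j hkj h1 h2
        rcases Nat.eq_or_lt_of_le hkj with rfl | hlt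
        · exact hk
        · exact hall j hlt h1 h2
      · intro hall j hkj h1 h2
        exact hall j (Nat.le_of_succ_le hkj) h1 h2
  | case3 k hg =>
      -- indices out of range: no j ≥ k satisfies the guards again
      rw [iff_true_intro (rfl : (true:Bool) = true), true_iff]
      intro j hkj h1 h2
      exfalso
      omega

-- characterisation of A's row test via mirrored indices
lemma pvRowTestA_iff (row : List Char) (a : Nat) (ha : 1 ≤ a) :
    pvRowTestA row (a : Int) = true ↔
      ∀ j : Nat, 0 ≤ (a:Int) - 1 - (j : Int) → (a:Int) + (j : Int) < (row.length : Int) →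
        PySem.List.pyGet? row ((a:Int) - 1 - (j : Int)) = PySem.List.pyGet? row ((a:Int) + (j : Int)) := by
  simp only [pvRowTestA, PySem.List.slice?_none_none_neg_one, Option.getD_some,
    PySem.List.slice_zero_start]
  rw [PySem.List.slice_to row (by positivity), PySem.List.slice_from row (by positivity)]
  simp only [Int.toNat_natCast, List.length_take, List.length_drop]
  set n := row.length with hn
  set m : Nat := min (min a n) (n - a) with hm
  rw [PySem.List.slice_from _ (by push_cast; omega), PySem.List.slice_to _ (by positivity)]
  have h1 : (((min a n : Nat) : Int) - (m:Int)).toNat = min a n - m := by omega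
  rw [h1, Int.toNat_natCast, beq_iff_eq]
  by_cases hcase : a ≤ n
  · have hmin : min a n = a := by omega
    have hm' : m = min a (n - a) := by omega
    -- lengths
    have hlcl : (List.drop (min a n - m) (List.take a row)).length = m := by
      simp [hmin]; omega
    have hlcr : (List.take m (List.drop a row)).reverse.length = m := by
      simp; omega
    constructor
    · intro heq j hj1 hj2
      have hj1' : j < a := by omega
      have hj2' : j < n - a := by omega
      have hjm : j < m := by omega
      have hi : m - 1 - j < m := by omega
      -- read off the getElem? equality at index i = m - 1 - j
      have hge := congrArg (fun (xs : List Char) => xs[m-1-j]?) heq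
      simp only [hmin] at hge
      have hL : (List.drop (a - m) (List.take a row))[m-1-j]? = row[(a - 1 - j : Nat)]? := by
        rw [List.getElem?_drop, List.getElem?_take_of_lt (by omega)]
        congr 1
        omega
      have hR : ((List.take m (List.drop a row)).reverse)[m-1-j]? = row[(a + j : Nat)]? := by
        rw [List.getElem?_reverse (by simp; omega)]
        have : (List.take m (List.drop a row)).length - 1 - (m - 1 - j) = j := by
          simp only [List.length_take, List.length_drop]; omega
        rw [this, List.getElem?_take_of_lt (by omega), List.getElem?_drop]
      simp only [hL, hR] at hge
      rw [show (a:Int) - 1 - (j:Int) = (((a - 1 - j : Nat)):Int) by omega,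
          show (a:Int) + (j:Int) = (((a + j : Nat)):Int) by omega,
          PySem.List.pyGet?_natCast, PySem.List.pyGet?_natCast]
      exact hge
    · intro hall
      apply List.ext_getElem (by rw [hlcl, hlcr])
      intro i hi1 hi2
      rw [hlcl] at hi1
      have hj : m - 1 - i < m := by omega
      have h := hall (m - 1 - i) (by omega) (by omega)
      rw [show (a:Int) - 1 - ((m-1-i : Nat):Int) = (((a - m + i : Nat)):Int) by omega,
          show (a:Int) + ((m-1-i : Nat):Int) = (((a + m - 1 - i : Nat)):Int) by omega,
          PySem.List.pyGet?_natCast, PySem.List.pyGet?_natCast] at h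
      rw [List.getElem_drop, List.getElem_take, List.getElem_reverse]
      rw [List.getElem?_eq_getElem (by omega), List.getElem?_eq_getElem (by omega)] at h
      have h' : row[a - m + i]'(by omega) = row[a + m - 1 - i]'(by omega) := Option.some.inj h
      have hrl : (List.take m (List.drop a row)).length = m := by
        simp only [List.length_take, List.length_drop]; omega
      rw [getElem_congr rfl (by rw [hrl] : (List.take m (List.drop a row)).length - 1 - i = m - 1 - i) (by simp only [List.length_take, List.length_drop]; omega)]
      rw [List.getElem_take, List.getElem_drop]
      rw [getElem_congr rfl (by omega : min a n - m + i = a - m + i) (by omega),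
          getElem_congr rfl (by omega : a + (m - 1 - i) = a + m - 1 - i) (by omega)]
      exact h'
  · -- a > n : both sides trivial
    have hmn : min a n = n := by omega
    have hm0 : m = 0 := by omega
    constructor
    · intro _ j hj1 hj2
      exfalso; omega
    · intro _
      simp only [hm0]
      simp
      omega

-- A's slice test equals B's expansion test for any axis ≥ 1
lemma pvRowTest_eq (row : List Char) (ax : Int) (hax : 1 ≤ ax) :
    pvRowTestA row ax = pvAxisOk row ax := by
  obtain ⟨a, rfl⟩ : ∃ a : Nat, ax = (a : Int) := ⟨ax.toNat, by omega⟩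
  rw [Bool.eq_iff_iff, pvRowTestA_iff row a (by exact_mod_cast hax), pvAxisOk, pvAxisOkGo_iff]
  constructor
  · intro h j _ h1 h2
    exact h j h1 h2
  · intro h j h1 h2
    exact h j (Nat.zero_le j) h1 h2

-- folding row-filters equals one filter by the conjunction over rows
lemma foldl_filter_eq (rows : List String) (init : List Int) :
    rows.foldl (fun axes row => axes.filter (fun ax => pvRowTestA row.toList ax)) init
      = init.filter (fun ax => rows.all (fun row => pvRowTestA row.toList ax)) := by
  induction rows generalizing init with
  | nil => simp
  | cons r rs ih =>
      simp only [List.foldl_cons, ih, List.filter_filter, List.all_cons]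
      exact List.filter_congr (fun x _ => Bool.and_comm _ _)

-- ===== VERDICT (by name: the statement is the Claim_ definition above) =====
theorem find_potential_reflection_axes_spec : Claim_equal_find_potential_reflection_axes := by
  intro p _ _
  unfold Spec_find_potential_reflection_axes find_potential_reflection_axes
    find_potential_reflection_axes_alt
  simp only [PySem.List.foldl_append_if_eq_filter, List.nil_append]
  rw [foldl_filter_eq]
  apply List.filter_congr
  intro ax hax
  have h1 : 1 ≤ ax := (PySem.List.mem_pyRange_one.mp hax).1
  exact List.all_congr rfl (fun row => pvRowTest_eq row.toList ax h1)
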